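-- pv_equiv track=rewrite | github.com/Vertafelungen/vertaefelungen | wissen/scripts/sync-from-sheet.py | align_images_and_alts
-- ===== SOURCE A (Python) =====
-- def align_images_and_alts(images: list[str], alts: list[str], fallback_title: str) -> tuple[list[str], list[str]]:
--     imgs = [img for img in images if img]
--     alts = [a for a in alts if a]
--     if not imgs:
--         return [], []
--     if len(alts) < len(imgs):
--         alts = alts + [fallback_title] * (len(imgs) - len(alts))
--     if len(alts) > len(imgs):
--         alts = alts[:len(imgs)]
--     return imgs, alts
-- ===== SOURCE B (Python) =====
-- def align_images_and_alts(images: list[str], alts: list[str], fallback_title: str) -> tuple[list[str], list[str]]: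
--     # Single pass: for each truthy image, lazily pull the next truthy alt from
--     # the alts stream (or the fallback once exhausted). No length arithmetic.
--     it = iter(alts)
--     imgs: list[str] = []
--     out_alts: list[str] = []
--     for img in images:
--         if img:
--             imgs.append(img)
--             out_alts.append(next((a for a in it if a), fallback_title))
--     return imgs, out_alts
-- ===== Notes on version B (the rewrite author's own statement) =====
-- stated objective: alternative
-- what changed: Replaces A's staged filter/guard/pad/truncate pipeline with one pass over images that lazily consumes the next truthy alt from a shared iterator (fallback once exhausted), so no lengths are ever computed or compared.
import Mathlib
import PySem

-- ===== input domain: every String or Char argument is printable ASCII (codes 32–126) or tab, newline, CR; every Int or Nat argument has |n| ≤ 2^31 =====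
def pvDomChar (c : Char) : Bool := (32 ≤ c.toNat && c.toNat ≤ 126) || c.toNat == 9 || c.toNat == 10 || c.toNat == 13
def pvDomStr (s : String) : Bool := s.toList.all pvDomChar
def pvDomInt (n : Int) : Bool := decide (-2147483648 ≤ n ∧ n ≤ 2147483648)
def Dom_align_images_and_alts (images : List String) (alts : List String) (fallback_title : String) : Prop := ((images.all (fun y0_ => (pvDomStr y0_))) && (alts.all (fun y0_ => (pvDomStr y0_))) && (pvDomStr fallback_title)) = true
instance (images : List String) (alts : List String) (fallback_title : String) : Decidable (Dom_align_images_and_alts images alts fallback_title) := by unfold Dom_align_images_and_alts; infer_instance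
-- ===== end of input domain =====

-- B replaces A's staged filter/guard/pad/truncate pipeline with one pass over images that lazily consumes the next truthy alt from a shared stream; objective: alternative (same cost).


-- ===== PORT A =====
def align_images_and_alts (images : List String) (alts : List String) (fallback_title : String) : List String × List String :=
  let imgs := images.filter (fun img => !(img == ""))
  let alts1 := alts.filter (fun a => !(a == ""))
  if imgs = [] then ([], [])
  else
    let alts2 := if alts1.length < imgs.length
      then alts1 ++ List.replicate (imgs.length - alts1.length) fallback_title
      else alts1
    let alts3 := if alts2.length > imgs.length
      then PySem.List.slice alts2 none (some (imgs.length : Int))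
      else alts2
    (imgs, alts3)

-- ===== PORT B =====
-- port of Source B's `next((a for a in it if a), fallback_title)`: consume the
-- stream until the first truthy element (or return the fallback when exhausted)
def pvB_next (fb : String) : List String → String × List String
  | [] => (fb, [])
  | a :: rest => if !(a == "") then (a, rest) else pvB_next fb rest

def align_images_and_alts_alt (images : List String) (alts : List String) (fallback_title : String) : List String × List String :=
  let s := images.foldl
    (fun (st : List String × List String × List String) img =>
      if !(img == "") then
        let (a, it') := pvB_next fallback_title st.2.2
        (st.1 ++ [img], st.2.1 ++ [a], it')
      else st)
    ([], [], alts)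
  (s.1, s.2.1)

-- ===== PRECONDITION & SPEC =====
def Spec_align_images_and_alts (images : List String) (alts : List String) (fallback_title : String) (out : List String × List String) : Prop := out = align_images_and_alts_alt images alts fallback_title
instance (images : List String) (alts : List String) (fallback_title : String) (out : List String × List String) : Decidable (Spec_align_images_and_alts images alts fallback_title out) := by unfold Spec_align_images_and_alts; infer_instance

-- ===== CLAIM (what is proved, stated in full; the proofs are below) =====
def Claim_equal_align_images_and_alts : Prop := ∀ (images : List String) (alts : List String) (fallback_title : String), Dom_align_images_and_alts images alts fallback_title → Spec_align_images_and_alts images alts fallback_title (align_images_and_alts images alts fallback_title)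

-- ===== LEMMAS AND PROOFS =====

-- "first n truthy alts, padded with fb": the common characterisation both sides meet
def pvPad (fb : String) : Nat → List String → List String
  | 0, _ => []
  | n + 1, af => (af.head?.getD fb) :: pvPad fb n af.tail

lemma pvB_next_fst (fb : String) (as : List String) :
    (pvB_next fb as).1 = ((as.filter (fun a => !(a == ""))).head?).getD fb := by
  induction as with
  | nil => simp [pvB_next]
  | cons a rest ih =>
    by_cases h : a = ""
    · simp [pvB_next, h, ih]
    · simp [pvB_next, h]

lemma pvB_next_snd (fb : String) (as : List String) :
    ((pvB_next fb as).2).filter (fun a => !(a == ""))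
      = ((as.filter (fun a => !(a == ""))).tail) := by
  induction as with
  | nil => simp [pvB_next]
  | cons a rest ih =>
    by_cases h : a = ""
    · simp [pvB_next, h, ih]
    · simp [pvB_next, h]

lemma foldl_char (fb : String) (images : List String) :
    ∀ (I O it : List String),
      ((images.foldl
          (fun (st : List String × List String × List String) img =>
            if !(img == "") then
              let (a, it') := pvB_next fb st.2.2
              (st.1 ++ [img], st.2.1 ++ [a], it')
            else st)
          (I, O, it)).1 = I ++ images.filter (fun i => !(i == "")))
      ∧ ((images.foldl
          (fun (st : List String × List String × List String) img =>
            if !(img == "") then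
              let (a, it') := pvB_next fb st.2.2
              (st.1 ++ [img], st.2.1 ++ [a], it')
            else st)
          (I, O, it)).2.1
        = O ++ pvPad fb (images.filter (fun i => !(i == ""))).length
            (it.filter (fun a => !(a == "")))) := by
  induction images with
  | nil => intro I O it; simp [pvPad]
  | cons img rest ih =>
    intro I O it
    by_cases h : img = ""
    · simpa [h] using ih I O it
    · have step : (if !(img == "") then
            let (a, it') := pvB_next fb it
            (I ++ [img], O ++ [a], it')
          else (I, O, it)) = (I ++ [img], O ++ [(pvB_next fb it).1], (pvB_next fb it).2) := by
        simp [h]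
      simp only [List.foldl_cons]
      rw [step]
      obtain ⟨h1, h2⟩ := ih (I ++ [img]) (O ++ [(pvB_next fb it).1]) (pvB_next fb it).2
      constructor
      · rw [h1]; simp [h]
      · rw [h2, pvB_next_snd, pvB_next_fst]
        simp [h, pvPad]

lemma alt_char (images alts : List String) (fb : String) :
    align_images_and_alts_alt images alts fb
      = (images.filter (fun i => !(i == "")),
         pvPad fb (images.filter (fun i => !(i == ""))).length
           (alts.filter (fun a => !(a == "")))) := by
  have h := foldl_char fb images [] [] alts
  unfold align_images_and_alts_alt
  exact Prod.ext (by simpa using h.1) (by simpa using h.2)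

lemma pvPad_eq_rangeMap (fb : String) (n : Nat) :
    ∀ af : List String,
      pvPad fb n af
        = (List.range n).map (fun i => if i < af.length then af.getD i "" else fb) := by
  induction n with
  | zero => intro af; simp [pvPad]
  | succ n ih =>
    intro af
    rw [List.range_succ_eq_map]
    simp only [List.map_cons, List.map_map, pvPad, ih af.tail]
    congr 1
    · cases af <;> simp
    · apply List.map_congr_left
      intro i _
      cases af with
      | nil => simp
      | cons a t => simp [Function.comp]

-- A's pad-or-truncate result, as the same range-indexed map
lemma snd_eq (af : List String) (fb : String) (n : Nat) :
    (let alts2 := if af.length < n then af ++ List.replicate (n - af.length) fb else af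
     if alts2.length > n then PySem.List.slice alts2 none (some (n : Int)) else alts2)
    = (List.range n).map (fun i => if i < af.length then af.getD i "" else fb) := by
  show (if _ > n then _ else _) = _
  rcases lt_trichotomy af.length n with h | h | h
  · simp only [if_pos h]
    have hl : (af ++ List.replicate (n - af.length) fb).length = n := by simp; omega
    rw [if_neg (by omega)]
    apply List.ext_getElem
    · simpa using hl
    · intro i h1 h2
      have hin : i < n := by simpa using h2
      rw [List.getElem_map, List.getElem_range]
      by_cases hia : i < af.length
      · simp [hia]
      · simp [List.getElem_append, hia]
  · simp only [if_neg (show ¬ af.length < n by omega)]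
    rw [if_neg (by omega)]
    apply List.ext_getElem
    · simpa using h
    · intro i h1 h2
      rw [List.getElem_map, List.getElem_range]
      have hia : i < af.length := h1
      simp [hia]
  · simp only [if_neg (show ¬ af.length < n by omega)]
    rw [if_pos (by omega), PySem.List.slice_to_natCast]
    apply List.ext_getElem
    · simp; omega
    · intro i h1 h2
      have hin : i < n := by simpa using h2
      rw [List.getElem_map, List.getElem_range]
      have hia : i < af.length := by omega
      simp [List.getElem_take, hia]

lemma main_eq (images alts : List String) (fb : String) :
    align_images_and_alts images alts fb = align_images_and_alts_alt images alts fb := by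
  rw [alt_char]
  unfold align_images_and_alts
  set imgs := images.filter (fun img => !(img == "")) with himgs
  set af := alts.filter (fun a => !(a == "")) with haf
  by_cases he : imgs = []
  · simp [he, pvPad]
  · simp only [if_neg he]
    refine congrArg (Prod.mk imgs) ?_
    rw [pvPad_eq_rangeMap]
    exact snd_eq af fb imgs.length

-- ===== VERDICT (by name: the statement is the Claim_ definition above) =====
theorem align_images_and_alts_spec : Claim_equal_align_images_and_alts := by
  intro images alts fb _
  exact main_eq images alts fb
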